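-- pv_equiv track=rewrite | github.com/acartag7/edictum-console | scripts/security-lint/check_tenant_isolation.py | _count_parens
-- ===== SOURCE A (Python) =====
-- def _count_parens(line: str) -> int:
--     """Count net parenthesis/bracket/brace depth change in a line.
--
--     Ignores characters inside string literals and comments.
--     """
--     depth = 0
--     in_single_quote = False
--     in_double_quote = False
--     in_triple_single = False
--     in_triple_double = False
--     j = 0
--     while j < len(line):
--         if not in_single_quote and not in_double_quote:
--             if line[j : j + 3] == '"""':
--                 in_triple_double = not in_triple_double
--                 j += 3
--                 continue
--             if line[j : j + 3] == "'''":
--                 in_triple_single = not in_triple_single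
--                 j += 3
--                 continue
--
--         c = line[j]
--
--         if in_triple_double or in_triple_single:
--             j += 1
--             continue
--
--         if c == "\\" and (in_single_quote or in_double_quote):
--             j += 2
--             continue
--
--         if c == '"' and not in_single_quote:
--             in_double_quote = not in_double_quote
--         elif c == "'" and not in_double_quote:
--             in_single_quote = not in_single_quote
--         elif not in_single_quote and not in_double_quote:
--             if c == "#":
--                 break  # rest of line is comment
--             if c in "([{":
--                 depth += 1
--             elif c in ")]}":
--                 depth -= 1
--
--         j += 1
--     return depth
-- ===== SOURCE B (Python) =====
-- def _count_parens(line: str) -> int: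
--     """Count net bracket depth using per-state skip subroutines instead of a
--     single flag-carrying state machine: the main loop only sees code-mode
--     characters; string literals and triple-quoted regions are consumed by
--     dedicated helpers that return the resume index."""
--     n = len(line)
--
--     def skip_string(j, quote):
--         # inside a '...' or "..." literal; returns index just past its end
--         while j < n:
--             c = line[j]
--             if c == "\\":
--                 j += 2
--             elif c == quote:
--                 return j + 1
--             else:
--                 j += 1
--         return j
--
--     def skip_triple(j, ts, td):
--         # inside triple-quoted mode(s); returns index where both flags clear
--         while j < n:
--             if line[j:j + 3] == '"""':
--                 td = not td
--                 j += 3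
--             elif line[j:j + 3] == "'''":
--                 ts = not ts
--                 j += 3
--             else:
--                 j += 1
--                 continue
--             if not ts and not td:
--                 return j
--         return j
--
--     depth = 0
--     j = 0
--     while j < n:
--         if line[j:j + 3] == '"""':
--             j = skip_triple(j + 3, False, True)
--         elif line[j:j + 3] == "'''":
--             j = skip_triple(j + 3, True, False)
--         else:
--             c = line[j]
--             if c == '"':
--                 j = skip_string(j + 1, '"')
--             elif c == "'":
--                 j = skip_string(j + 1, "'")
--             elif c == "#":
--                 break
--             else:
--                 if c in "([{":
--                     depth += 1
--                 elif c in ")]}":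
--                     depth -= 1
--                 j += 1
--     return depth
-- ===== Notes on version B (the rewrite author's own statement) =====
-- stated objective: alternative
-- what changed: B replaces A's single flag-carrying state machine with a main code-mode loop that delegates to dedicated skip subroutines (one for single/double-quoted strings, one for triple-quoted regions) which consume their region and return the resume position.
import Mathlib
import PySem

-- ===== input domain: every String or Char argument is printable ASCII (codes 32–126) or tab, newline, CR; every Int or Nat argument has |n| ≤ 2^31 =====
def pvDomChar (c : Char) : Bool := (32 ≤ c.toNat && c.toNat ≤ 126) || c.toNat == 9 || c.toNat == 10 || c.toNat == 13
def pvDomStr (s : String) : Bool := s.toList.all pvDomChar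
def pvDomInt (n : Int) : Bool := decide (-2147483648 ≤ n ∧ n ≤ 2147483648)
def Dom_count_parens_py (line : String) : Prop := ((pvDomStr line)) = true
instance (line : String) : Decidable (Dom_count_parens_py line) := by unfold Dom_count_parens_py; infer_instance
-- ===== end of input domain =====

-- B replaces A's flag-carrying state machine with a code-mode loop delegating to
-- per-state skip subroutines; same O(n) cost, no behaviour change claimed beyond the theorem.

-- ===== PORT A =====
-- line[j:j+3] == '"""' / "'''": true iff the next three chars are all `ch`
def pvTriple3 (l : List Char) (ch : Char) : Bool :=
  match l with
  | a :: b :: c :: _ => a == ch && b == ch && c == ch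
  | _ => false

-- A's while-loop over the remaining characters, carrying the four quote flags and depth
def pvLoopA (l : List Char) (sq dq ts td : Bool) (d : Int) : Int :=
  match l with
  | [] => d
  | c :: rest =>
    if !sq && !dq && pvTriple3 (c :: rest) '"' then
      pvLoopA (rest.drop 2) sq dq ts (!td) d
    else if !sq && !dq && pvTriple3 (c :: rest) '\'' then
      pvLoopA (rest.drop 2) sq dq (!ts) td d
    else if ts || td then
      pvLoopA rest sq dq ts td d
    else if c == '\\' && (sq || dq) then
      pvLoopA (rest.drop 1) sq dq ts td d
    else if c == '"' && !sq then
      pvLoopA rest sq (!dq) ts td d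
    else if c == '\'' && !dq then
      pvLoopA rest (!sq) dq ts td d
    else if !sq && !dq then
      if c == '#' then d
      else if c == '(' || c == '[' || c == '{' then pvLoopA rest sq dq ts td (d + 1)
      else if c == ')' || c == ']' || c == '}' then pvLoopA rest sq dq ts td (d - 1)
      else pvLoopA rest sq dq ts td d
    else
      pvLoopA rest sq dq ts td d
termination_by l.length
decreasing_by
  all_goals (simp; try omega)

def count_parens_py (line : String) : Int :=
  pvLoopA line.toList false false false false 0

-- ===== PORT B =====
-- B's skip_string: consume a single/double-quoted literal, return the remaining suffix
def pvSkipString (l : List Char) (q : Char) : List Char :=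
  match l with
  | [] => []
  | c :: rest =>
    if c == '\\' then pvSkipString (rest.drop 1) q
    else if c == q then rest
    else pvSkipString rest q
termination_by l.length
decreasing_by
  all_goals (simp; try omega)

-- B's skip_triple: consume triple-quoted region(s), return the suffix where both flags clear
def pvSkipTriple (l : List Char) (ts td : Bool) : List Char :=
  match l with
  | [] => []
  | c :: rest =>
    if pvTriple3 (c :: rest) '"' then
      if !ts && td then rest.drop 2
      else pvSkipTriple (rest.drop 2) ts (!td)
    else if pvTriple3 (c :: rest) '\'' then
      if ts && !td then rest.drop 2
      else pvSkipTriple (rest.drop 2) (!ts) td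
    else pvSkipTriple rest ts td
termination_by l.length
decreasing_by
  all_goals (simp; try omega)

-- length bounds cited by pvScanCode's decreasing_by (termination of the port)
theorem pvSkipString_length_le (l : List Char) (q : Char) :
    (pvSkipString l q).length ≤ l.length := by
  fun_induction pvSkipString l q <;> simp_all <;> omega

theorem pvSkipTriple_length_le (l : List Char) (ts td : Bool) :
    (pvSkipTriple l ts td).length ≤ l.length := by
  fun_induction pvSkipTriple l ts td <;> simp_all <;> omega

-- B's main loop: only ever in code mode; strings/triple regions handled by the helpers
def pvScanCode (l : List Char) (d : Int) : Int :=
  match l with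
  | [] => d
  | c :: rest =>
    if pvTriple3 (c :: rest) '"' then
      pvScanCode (pvSkipTriple (rest.drop 2) false true) d
    else if pvTriple3 (c :: rest) '\'' then
      pvScanCode (pvSkipTriple (rest.drop 2) true false) d
    else if c == '"' then pvScanCode (pvSkipString rest '"') d
    else if c == '\'' then pvScanCode (pvSkipString rest '\'') d
    else if c == '#' then d
    else if c == '(' || c == '[' || c == '{' then pvScanCode rest (d + 1)
    else if c == ')' || c == ']' || c == '}' then pvScanCode rest (d - 1)
    else pvScanCode rest d
termination_by l.length
decreasing_by
  all_goals simp
  all_goals (first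
    | exact le_trans (pvSkipTriple_length_le _ _ _) (by simp)
    | exact pvSkipString_length_le _ _)

def count_parens_py_alt (line : String) : Int :=
  pvScanCode line.toList 0

-- ===== PRECONDITION & SPEC =====
def Spec_count_parens_py (line : String) (out : Int) : Prop := out = count_parens_py_alt line
instance (line : String) (out : Int) : Decidable (Spec_count_parens_py line out) := by unfold Spec_count_parens_py; infer_instance

-- ===== CLAIM (what is proved, stated in full; the proofs are below) =====
def Claim_equal_count_parens_py : Prop := ∀ (line : String), Dom_count_parens_py line → Spec_count_parens_py line (count_parens_py line)

-- ===== LEMMAS AND PROOFS =====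

-- A inside a double-quoted string ≡ B's skip_string then code mode
theorem pvLoopA_dq (l : List Char) (d : Int) :
    pvLoopA l false true false false d = pvLoopA (pvSkipString l '"') false false false false d := by
  fun_induction pvSkipString l '"'
  all_goals (try rw [pvLoopA])
  all_goals simp_all [pvLoopA]

-- A inside a single-quoted string ≡ B's skip_string then code mode
theorem pvLoopA_sq (l : List Char) (d : Int) :
    pvLoopA l true false false false d = pvLoopA (pvSkipString l '\'') false false false false d := by
  fun_induction pvSkipString l '\''
  all_goals (try rw [pvLoopA])
  all_goals simp_all [pvLoopA]

-- A inside triple-quoted mode(s) ≡ B's skip_triple then code mode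
theorem pvLoopA_triple (l : List Char) (ts td : Bool) (d : Int) (h : (ts || td) = true) :
    pvLoopA l false false ts td d = pvLoopA (pvSkipTriple l ts td) false false false false d := by
  induction hn : l.length using Nat.strong_induction_on generalizing l ts td with
  | _ n IH => ?_
  subst hn
  match l with
  | [] => simp [pvLoopA, pvSkipTriple]
  | c :: rest =>
    rw [pvLoopA, pvSkipTriple]
    by_cases h3 : pvTriple3 (c :: rest) '"' = true
    · simp only [h3, Bool.not_false, Bool.true_and, if_true]
      by_cases hc : (!ts && td) = true
      · have hts : ts = false := by revert hc; cases ts <;> simp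
        have htd : td = true := by revert hc; cases ts <;> cases td <;> simp_all
        simp [hts, htd]
      · have h' : (ts || !td) = true := by cases ts <;> cases td <;> simp_all
        simp only [hc, Bool.false_eq_true, not_false_eq_true, if_neg]
        exact IH (rest.drop 2).length (by simp) _ _ _ h' rfl
    · by_cases h3' : pvTriple3 (c :: rest) '\'' = true
      · simp only [h3, h3', Bool.not_false, Bool.true_and, Bool.false_eq_true, not_false_eq_true,
          if_neg, if_true]
        by_cases hc : (ts && !td) = true
        · have hts : ts = true := by cases ts <;> simp_all
          have htd : td = false := by cases ts <;> cases td <;> simp_all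
          simp [hts, htd]
        · have h' : (!ts || td) = true := by cases ts <;> cases td <;> simp_all
          simp only [hc, Bool.false_eq_true, not_false_eq_true, if_neg]
          exact IH (rest.drop 2).length (by simp) _ _ _ h' rfl
      · simp only [h3, h3', Bool.false_eq_true, not_false_eq_true, if_neg, Bool.not_false,
          Bool.true_and, h, if_true]
        exact IH rest.length (by simp) _ _ _ h rfl

-- code mode: A's loop equals B's main loop
theorem pvLoopA_eq_scan (l : List Char) (d : Int) :
    pvLoopA l false false false false d = pvScanCode l d := by
  fun_induction pvScanCode l d
  all_goals (try rw [pvLoopA])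
  all_goals simp_all
  all_goals (first
    | (rw [pvLoopA_triple _ false true _ (by simp)]; assumption)
    | (rw [pvLoopA_triple _ true false _ (by simp)]; assumption)
    | (rw [pvLoopA_dq]; assumption)
    | (rw [pvLoopA_sq]; assumption))

-- ===== VERDICT (by name: the statement is the Claim_ definition above) =====
theorem count_parens_py_spec : Claim_equal_count_parens_py := by
  intro line _
  unfold Spec_count_parens_py count_parens_py count_parens_py_alt
  exact pvLoopA_eq_scan line.toList 0
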